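-- pv_equiv track=rewrite | github.com/WJD1005/2048Robot | AI版/greedy.py | try_move_up
-- ===== SOURCE A (Python) =====
-- import copy
--
-- def try_move_up(map):
--     """
--     尝试向上移动，计算总分数。
--     :param map: 地图
--     :return: 是否有效, 移动获得的分数
--     """
--     is_valid = False
--     score = 0
--     map_temp = copy.deepcopy(map)  # 副本
--     # 提取一列
--     for j in range(4):
--         # 遍历前方块
--         for i in range(3):
--             # 寻找下一个非0
--             for next in range(i + 1, 4):
--                 if map_temp[next][j] != 0:
--                     # 如果前方块是0则移动，并继续往后看
--                     if map_temp[i][j] == 0: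
--                         map_temp[i][j] = map_temp[next][j]
--                         map_temp[next][j] = 0
--                         is_valid = True
--                     # 如果和前方块相等则合并并跳出不再找下一个避免重复合并
--                     elif map_temp[i][j] == map_temp[next][j]:
--                         map_temp[i][j] *= 2
--                         map_temp[next][j] = 0
--                         score += map_temp[i][j]
--                         is_valid = True
--                         break
--                     # 如果和前方块不相等则直接跳出
--                     else:
--                         break
--             # 后面没有非0了这列可以结束了
--             else:
--                 break
--     score += adjacent_check(map_temp)  # 计算相邻方块对分数
--     return is_valid, score
--
-- def adjacent_check(map):
--     """
--     检查相邻方块配对，一对相邻方块加方块数字的分数（合成的一半）。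
--     :param map: 地图
--     :return: 相邻方块对分数
--     """
--     score = 0
--     # 检查行有无2个相邻相同方块
--     for i in range(4):
--         j = 0
--         while j < 3:
--             if map[i][j] == map[i][j + 1]:
--                 score += map[i][j]
--                 j += 2  # 两两配对都跳过
--             else:
--                 j += 1
--     # 检查列有无2个相邻相同方块
--     for j in range(4):
--         i = 0
--         while i < 3:
--             if map[i][j] == map[i + 1][j]:
--                 score += map[i][j]
--                 i += 2  # 两两配对都跳过
--             else:
--                 i += 1
--     return score
-- ===== SOURCE B (Python) =====
-- def _merge(cells):
--     # merge adjacent equal tiles of a zero-free column, left to right, each tile once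
--     if len(cells) >= 2 and cells[0] == cells[1]:
--         rest, s = _merge(cells[2:])
--         return [2 * cells[0]] + rest, s + 2 * cells[0]
--     if cells:
--         rest, s = _merge(cells[1:])
--         return [cells[0]] + rest, s
--     return [], 0
--
-- def _pair_score(cells):
--     # score of adjacent equal pairs, pairing left to right without reuse
--     if len(cells) >= 2 and cells[0] == cells[1]:
--         return cells[0] + _pair_score(cells[2:])
--     if cells:
--         return _pair_score(cells[1:])
--     return 0
--
-- def try_move_up(map):
--     score = 0
--     new_cols = []
--     valid = False
--     for j in range(4):
--         col = [map[i][j] for i in range(4)]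
--         merged, s = _merge([x for x in col if x != 0])
--         newcol = merged + [0] * (4 - len(merged))
--         score += s
--         if newcol != col:
--             valid = True
--         new_cols.append(newcol)
--     rows = [[new_cols[j][i] for j in range(4)] for i in range(4)]
--     score += sum(_pair_score(r) for r in rows) + sum(_pair_score(c) for c in new_cols)
--     return valid, score
-- ===== Notes on version B (the rewrite author's own statement) =====
-- stated objective: simpler
-- what changed: Instead of A's in-place triple-nested index loops that shift and merge cells inside a deep-copied grid, B rebuilds each column functionally in one pass (filter out zeros, merge adjacent equal pairs recursively, pad with zeros), detects validity as 'some rebuilt column differs from the input column', and scores adjacency with one shared recursive pair-scan helper.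
import Mathlib
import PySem

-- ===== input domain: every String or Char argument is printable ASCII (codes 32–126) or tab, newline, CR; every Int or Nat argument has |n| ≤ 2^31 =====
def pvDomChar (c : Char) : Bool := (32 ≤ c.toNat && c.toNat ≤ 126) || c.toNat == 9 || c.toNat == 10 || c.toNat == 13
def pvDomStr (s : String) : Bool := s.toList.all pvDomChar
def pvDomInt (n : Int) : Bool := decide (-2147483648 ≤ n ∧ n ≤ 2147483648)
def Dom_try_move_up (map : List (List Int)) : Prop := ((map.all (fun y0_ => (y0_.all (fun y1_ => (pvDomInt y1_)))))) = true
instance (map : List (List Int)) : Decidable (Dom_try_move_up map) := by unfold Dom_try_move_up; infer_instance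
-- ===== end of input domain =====

-- B rebuilds each column by a single compact-and-merge pass (simpler, no in-place triple loop); equal return value proved on 4×4-accessible grids.

-- ===== PORT A =====
-- in-range 2-d read / write on the list-of-lists grid (indices are in range on Pre_, so the defaults are never used)
def pvGet (m : List (List Int)) (i j : Nat) : Int := (m.getD i []).getD j 0
def pvSet (m : List (List Int)) (i j : Nat) (v : Int) : List (List Int) :=
  m.set i ((m.getD i []).set j v)

-- `for next in range(i+1, 4)` with its three-way branch; the extra Bool records whether the loop broke
def innerA (j i : Nat) : List Nat → (List (List Int) × Bool × Int) → (List (List Int) × Bool × Int) × Bool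
| [], st => (st, false)
| next :: rest, (mt, valid, score) =>
  if pvGet mt next j ≠ 0 then
    if pvGet mt i j = 0 then
      innerA j i rest (pvSet (pvSet mt i j (pvGet mt next j)) next j 0, true, score)
    else if pvGet mt i j = pvGet mt next j then
      ((pvSet (pvSet mt i j (pvGet mt i j * 2)) next j 0, true, score + pvGet mt i j * 2), true)
    else ((mt, valid, score), true)
  else innerA j i rest (mt, valid, score)

-- `for i in range(3)` with the for-else: if the inner loop did NOT break, break this loop
def iLoopA (j : Nat) : List Nat → (List (List Int) × Bool × Int) → (List (List Int) × Bool × Int)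
| [], st => st
| i :: rest, st =>
  let r := innerA j i (List.range' (i+1) (3-i)) st
  if r.2 then iLoopA j rest r.1 else r.1

-- `while j < 3` row scan of adjacent_check (fuel 4 is enough: j grows each step)
def rowWhile (m : List (List Int)) (i : Nat) : Nat → Nat → Int → Int
| 0, _, s => s
| f+1, j, s =>
  if j < 3 then
    if pvGet m i j = pvGet m i (j+1) then rowWhile m i f (j+2) (s + pvGet m i j)
    else rowWhile m i f (j+1) s
  else s

def colWhile (m : List (List Int)) (j : Nat) : Nat → Nat → Int → Int
| 0, _, s => s
| f+1, i, s =>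
  if i < 3 then
    if pvGet m i j = pvGet m (i+1) j then colWhile m j f (i+2) (s + pvGet m i j)
    else colWhile m j f (i+1) s
  else s

def adjacent_check (m : List (List Int)) : Int :=
  let s1 := (List.range 4).foldl (fun s i => rowWhile m i 4 0 s) 0
  (List.range 4).foldl (fun s j => colWhile m j 4 0 s) s1

def try_move_up (map : List (List Int)) : Bool × Int :=
  let st := (List.range 4).foldl (fun st j => iLoopA j [0, 1, 2] st) (map, false, 0)
  (st.2.1, st.2.2 + adjacent_check st.1)

-- ===== PORT B =====
def mergeB : List Int → List Int × Int
| a :: b :: rest =>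
  if a = b then
    let r := mergeB rest; (2*a :: r.1, r.2 + 2*a)
  else
    let r := mergeB (b :: rest); (a :: r.1, r.2)
| l => (l, 0)

def pairB : List Int → Int
| a :: b :: rest => if a = b then a + pairB rest else pairB (b :: rest)
| _ => 0

def try_move_up_alt (map : List (List Int)) : Bool × Int :=
  let st := (List.range 4).foldl (fun (acc : Int × List (List Int) × Bool) j =>
    let col := [pvGet map 0 j, pvGet map 1 j, pvGet map 2 j, pvGet map 3 j]
    let ms := mergeB (col.filter (· ≠ 0))
    let newcol := ms.1 ++ List.replicate (4 - ms.1.length) 0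
    (acc.1 + ms.2, acc.2.1 ++ [newcol], acc.2.2 || decide (newcol ≠ col))) (0, [], false)
  let cols := st.2.1
  let rows := (List.range 4).map (fun i => (List.range 4).map (fun j => (cols.getD j []).getD i 0))
  (st.2.2, st.1 + ((rows.map pairB).sum + (cols.map pairB).sum))

-- ===== PRECONDITION & SPEC =====
-- Pre_: exactly the grids A indexes without an IndexError: at least 4 rows, the first 4 rows at least 4 wide.
def Pre_try_move_up (map : List (List Int)) : Prop :=
  4 ≤ map.length ∧ ∀ i ∈ List.range 4, 4 ≤ (map.getD i []).length
instance (map : List (List Int)) : Decidable (Pre_try_move_up map) := by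
  unfold Pre_try_move_up; infer_instance
def pvWitness_try_move_up : List (List Int) :=
  [[2, 2, 0, 4], [0, 2, 4, 4], [2, 0, 0, 8], [0, 0, 4, 8]]

def Spec_try_move_up (map : List (List Int)) (out : Bool × Int) : Prop := out = try_move_up_alt map
instance (map : List (List Int)) (out : Bool × Int) : Decidable (Spec_try_move_up map out) := by unfold Spec_try_move_up; infer_instance

-- ===== CLAIM (what is proved, stated in full; the proofs are below) =====
def Claim_equal_try_move_up : Prop := ∀ (map : List (List Int)), Dom_try_move_up map → Pre_try_move_up map → Spec_try_move_up map (try_move_up map)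

-- ===== LEMMAS AND PROOFS =====

-- abstract machine for A's per-column loop, acting on the 4 cells of one column
def qget (q : Int×Int×Int×Int) : Nat → Int
| 0 => q.1
| 1 => q.2.1
| 2 => q.2.2.1
| _ => q.2.2.2

def qset (q : Int×Int×Int×Int) : Nat → Int → Int×Int×Int×Int
| 0, v => (v, q.2.1, q.2.2.1, q.2.2.2)
| 1, v => (q.1, v, q.2.2.1, q.2.2.2)
| 2, v => (q.1, q.2.1, v, q.2.2.2)
| _, v => (q.1, q.2.1, q.2.2.1, v)

def innerQ (i : Nat) : List Nat → ((Int×Int×Int×Int) × Bool × Int) → (((Int×Int×Int×Int) × Bool × Int) × Bool)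
| [], st => (st, false)
| next :: rest, (q, valid, score) =>
  if qget q next ≠ 0 then
    if qget q i = 0 then innerQ i rest (qset (qset q i (qget q next)) next 0, true, score)
    else if qget q i = qget q next then ((qset (qset q i (qget q i * 2)) next 0, true, score + qget q i * 2), true)
    else ((q, valid, score), true)
  else innerQ i rest (q, valid, score)

def iLoopQ : List Nat → ((Int×Int×Int×Int) × Bool × Int) → ((Int×Int×Int×Int) × Bool × Int)
| [], st => st
| i :: rest, st =>
  let r := innerQ i (List.range' (i+1) (3-i)) st
  if r.2 then iLoopQ rest r.1 else r.1

def newCol (c : List Int) : List Int :=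
  (mergeB (c.filter (· ≠ 0))).1 ++ List.replicate (4 - (mergeB (c.filter (· ≠ 0))).1.length) 0

def colL (m : List (List Int)) (j : Nat) : List Int :=
  [pvGet m 0 j, pvGet m 1 j, pvGet m 2 j, pvGet m 3 j]

theorem qget_qset (q : Int×Int×Int×Int) (v : Int) (k k' : Nat) (hk : k < 4) (hk' : k' < 4) :
    qget (qset q k v) k' = if k' = k then v else qget q k' := by
  interval_cases k <;> interval_cases k' <;> simp [qget, qset]

theorem pvSet_length (m : List (List Int)) (i j : Nat) (v : Int) :
    (pvSet m i j v).length = m.length := by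
  simp [pvSet]

theorem pvSet_row_length (m : List (List Int)) (i j : Nat) (v : Int) (i' : Nat) :
    ((pvSet m i j v).getD i' []).length = (m.getD i' []).length := by
  unfold pvSet
  by_cases hi : i < m.length
  · by_cases h : i' = i
    · subst h
      rw [List.getD_eq_getElem?_getD, List.getElem?_set_self hi, List.getD_eq_getElem?_getD]
      simp [List.getD_eq_getElem?_getD, List.getElem?_eq_getElem hi]
    · simp [List.getD_eq_getElem?_getD, List.getElem?_set_ne (Ne.symm h)]
  · simp [List.set_eq_of_length_le (by omega : m.length ≤ i)]

theorem pre_pvSet (m : List (List Int)) (i j : Nat) (v : Int)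
    (hm : Pre_try_move_up m) : Pre_try_move_up (pvSet m i j v) := by
  obtain ⟨h1, h2⟩ := hm
  refine ⟨by rw [pvSet_length]; exact h1, fun k hk => ?_⟩
  rw [pvSet_row_length]; exact h2 k hk

theorem pvGet_pvSet (m : List (List Int)) (i j : Nat) (v : Int) (i' j' : Nat)
    (hi : i < m.length) (hj : j < (m.getD i []).length) :
    pvGet (pvSet m i j v) i' j' = if i' = i ∧ j' = j then v else pvGet m i' j' := by
  unfold pvGet pvSet
  by_cases h : i' = i
  · subst h
    have hrow : (m.set i' ((m.getD i' []).set j v)).getD i' [] = (m.getD i' []).set j v := by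
      rw [List.getD_eq_getElem?_getD, List.getElem?_set_self hi]; rfl
    rw [hrow]
    by_cases hjj : j' = j
    · subst hjj
      simp only [List.getD_eq_getElem?_getD] at hj ⊢
      rw [List.getElem?_set_self (by simpa using hj)]
      simp
    · simp [List.getD_eq_getElem?_getD, List.getElem?_set_ne (Ne.symm hjj), hjj]
  · simp [List.getD_eq_getElem?_getD, List.getElem?_set_ne (Ne.symm h), h]

-- the per-column machine computes exactly B's compact-merge-pad column (exhaustive case analysis)
theorem qMain (a b c d : Int) (v : Bool) (s : Int) :
  iLoopQ [0,1,2] ((a,b,c,d),v,s) =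
    (((newCol [a,b,c,d]).getD 0 0, (newCol [a,b,c,d]).getD 1 0, (newCol [a,b,c,d]).getD 2 0, (newCol [a,b,c,d]).getD 3 0),
     v || decide (newCol [a,b,c,d] ≠ [a,b,c,d]), s + (mergeB ([a,b,c,d].filter (· ≠ 0))).2) := by
  have pvm : ∀ x : Int, x * 2 = 2 * x := fun x => by ring
  have r1 : List.range' 1 3 = [1,2,3] := rfl
  have r2 : List.range' 2 2 = [2,3] := rfl
  have r3 : List.range' 3 1 = [3] := rfl
  by_cases h86206_2 : b = 0
  · by_cases h19481_4 : c = 0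
    · by_cases h62991_6 : d = 0
      · by_cases h31064_8 : a = 0
        · (simp_all [iLoopQ, innerQ, qget, qset, newCol, mergeB, pvm]; try omega)
        · (simp_all [iLoopQ, innerQ, qget, qset, newCol, mergeB, pvm]; try omega)
      · by_cases h31064_8 : a = 0
        · (simp_all [iLoopQ, innerQ, qget, qset, newCol, mergeB, pvm]; try omega)
        · by_cases h51477_10 : a = d
          · (simp_all [iLoopQ, innerQ, qget, qset, newCol, mergeB, pvm]; try omega)
          · (simp_all [iLoopQ, innerQ, qget, qset, newCol, mergeB, pvm]; try omega)
    · by_cases h31064_6 : a = 0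
      · by_cases h62991_8 : d = 0
        · (simp_all [iLoopQ, innerQ, qget, qset, newCol, mergeB, pvm]; try omega)
        · by_cases h80550_10 : c = d
          · (simp_all [iLoopQ, innerQ, qget, qset, newCol, mergeB, pvm]; try omega)
          · (simp_all [iLoopQ, innerQ, qget, qset, newCol, mergeB, pvm]; try omega)
      · by_cases h31720_8 : a = c
        · by_cases h62991_10 : d = 0
          · (simp_all [iLoopQ, innerQ, qget, qset, newCol, mergeB, pvm]; try omega)
          · (simp_all [iLoopQ, innerQ, qget, qset, newCol, mergeB, pvm]; try omega)
        · by_cases h62991_10 : d = 0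
          · (simp_all [iLoopQ, innerQ, qget, qset, newCol, mergeB, pvm]; try omega)
          · by_cases h80550_12 : c = d
            · (simp_all [iLoopQ, innerQ, qget, qset, newCol, mergeB, pvm]; try omega)
            · (simp_all [iLoopQ, innerQ, qget, qset, newCol, mergeB, pvm]; try omega)
  · by_cases h31064_4 : a = 0
    · by_cases h19481_6 : c = 0
      · by_cases h62991_8 : d = 0
        · (simp_all [iLoopQ, innerQ, qget, qset, newCol, mergeB, pvm]; try omega)
        · by_cases h96401_10 : b = d
          · (simp_all [iLoopQ, innerQ, qget, qset, newCol, mergeB, pvm]; try omega)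
          · (simp_all [iLoopQ, innerQ, qget, qset, newCol, mergeB, pvm]; try omega)
      · by_cases h48030_8 : b = c
        · by_cases h62991_10 : d = 0
          · (simp_all [iLoopQ, innerQ, qget, qset, newCol, mergeB, pvm]; try omega)
          · (simp_all [iLoopQ, innerQ, qget, qset, newCol, mergeB, pvm]; try omega)
        · by_cases h62991_10 : d = 0
          · (simp_all [iLoopQ, innerQ, qget, qset, newCol, mergeB, pvm]; try omega)
          · by_cases h80550_12 : c = d
            · (simp_all [iLoopQ, innerQ, qget, qset, newCol, mergeB, pvm]; try omega)
            · (simp_all [iLoopQ, innerQ, qget, qset, newCol, mergeB, pvm]; try omega)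
    · by_cases h33029_6 : a = b
      · by_cases h19481_8 : c = 0
        · by_cases h62991_10 : d = 0
          · (simp_all [iLoopQ, innerQ, qget, qset, newCol, mergeB, pvm]; try omega)
          · (simp_all [iLoopQ, innerQ, qget, qset, newCol, mergeB, pvm]; try omega)
        · by_cases h62991_10 : d = 0
          · (simp_all [iLoopQ, innerQ, qget, qset, newCol, mergeB, pvm]; try omega)
          · by_cases h80550_12 : c = d
            · (simp_all [iLoopQ, innerQ, qget, qset, newCol, mergeB, pvm]; try omega)
            · (simp_all [iLoopQ, innerQ, qget, qset, newCol, mergeB, pvm]; try omega)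
      · by_cases h19481_8 : c = 0
        · by_cases h62991_10 : d = 0
          · (simp_all [iLoopQ, innerQ, qget, qset, newCol, mergeB, pvm]; try omega)
          · by_cases h96401_12 : b = d
            · (simp_all [iLoopQ, innerQ, qget, qset, newCol, mergeB, pvm]; try omega)
            · (simp_all [iLoopQ, innerQ, qget, qset, newCol, mergeB, pvm]; try omega)
        · by_cases h48030_10 : b = c
          · by_cases h62991_12 : d = 0
            · (simp_all [iLoopQ, innerQ, qget, qset, newCol, mergeB, pvm]; try omega)
            · (simp_all [iLoopQ, innerQ, qget, qset, newCol, mergeB, pvm]; try omega)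
          · by_cases h62991_12 : d = 0
            · (simp_all [iLoopQ, innerQ, qget, qset, newCol, mergeB, pvm]; try omega)
            · by_cases h80550_14 : c = d
              · (simp_all [iLoopQ, innerQ, qget, qset, newCol, mergeB, pvm]; try omega)
              · (simp_all [iLoopQ, innerQ, qget, qset, newCol, mergeB, pvm]; try omega)


-- A's inner `for next` loop simulates the abstract machine on column j
theorem innerSim (nexts : List Nat) :
    ∀ (m : List (List Int)) (q : Int×Int×Int×Int) (v : Bool) (s : Int) (i j : Nat),
    (∀ n ∈ nexts, n < 4) → i < 4 → j < 4 → Pre_try_move_up m →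
    (∀ i' < 4, pvGet m i' j = qget q i') →
    ∃ m', innerA j i nexts (m, v, s) = ((m', (innerQ i nexts (q, v, s)).1.2), (innerQ i nexts (q, v, s)).2)
      ∧ Pre_try_move_up m'
      ∧ (∀ i' < 4, pvGet m' i' j = qget (innerQ i nexts (q, v, s)).1.1 i')
      ∧ (∀ i' j', j' ≠ j → pvGet m' i' j' = pvGet m i' j') := by
  induction nexts with
  | nil =>
    intro m q v s i j _ _ _ hm hq
    exact ⟨m, rfl, hm, hq, fun _ _ _ => rfl⟩
  | cons next rest ih =>
    intro m q v s i j hn hi4 hj4 hm hq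
    have hn4 : next < 4 := hn next (by simp)
    have hrest : ∀ n ∈ rest, n < 4 := fun n hn' => hn n (by simp [hn'])
    have hilen : i < m.length := lt_of_lt_of_le hi4 hm.1
    have hjlen : j < (m.getD i []).length := lt_of_lt_of_le hj4 (hm.2 i (by simp [List.mem_range]; omega))
    have hnlen : next < m.length := lt_of_lt_of_le hn4 hm.1
    have hcond : pvGet m next j = qget q next := hq next hn4
    have hcondi : pvGet m i j = qget q i := hq i hi4
    rw [innerA, innerQ, hcond, hcondi]
    by_cases h0 : qget q next = 0
    · simp only [h0, ne_eq, not_true_eq_false, if_false, reduceIte]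
      exact ih m q v s i j hrest hi4 hj4 hm hq
    · simp only [h0, ne_eq, not_false_eq_true, if_true, reduceIte]
      by_cases hz : qget q i = 0
      · simp only [hz, if_pos rfl, reduceIte]
        set m2 := pvSet (pvSet m i j (qget q next)) next j 0 with hm2
        set q2 := qset (qset q i (qget q next)) next 0 with hq2
        have hm2p : Pre_try_move_up m2 := pre_pvSet _ _ _ _ (pre_pvSet _ _ _ _ hm)
        have hq2g : ∀ i' < 4, pvGet m2 i' j = qget q2 i' := by
          intro i' hi'
          have hil2 : i < (pvSet m i j (qget q next)).length := by rw [pvSet_length]; exact hilen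
          have hnl2 : next < (pvSet m i j (qget q next)).length := by rw [pvSet_length]; exact hnlen
          have hjl2 : j < ((pvSet m i j (qget q next)).getD next []).length := by
            rw [pvSet_row_length]
            exact lt_of_lt_of_le hj4 (hm.2 next (by simp [List.mem_range]; omega))
          rw [hm2, pvGet_pvSet _ _ _ _ _ _ hnl2 hjl2, pvGet_pvSet _ _ _ _ _ _ hilen hjlen,
            hq2, qget_qset _ _ _ _ hn4 hi', qget_qset _ _ _ _ hi4 hi']
          by_cases e1 : i' = next <;> by_cases e2 : i' = i <;> simp [e1, e2, hq i' hi']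
        have hoth : ∀ i' j', j' ≠ j → pvGet m2 i' j' = pvGet m i' j' := by
          intro i' j' hne
          have hjl2 : j < ((pvSet m i j (qget q next)).getD next []).length := by
            rw [pvSet_row_length]
            exact lt_of_lt_of_le hj4 (hm.2 next (by simp [List.mem_range]; omega))
          have hnl2 : next < (pvSet m i j (qget q next)).length := by rw [pvSet_length]; exact hnlen
          rw [hm2, pvGet_pvSet _ _ _ _ _ _ hnl2 hjl2, pvGet_pvSet _ _ _ _ _ _ hilen hjlen]
          simp [hne]
        obtain ⟨m', e1, e2, e3, e4⟩ := ih m2 q2 true s i j hrest hi4 hj4 hm2p hq2g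
        exact ⟨m', e1, e2, e3, fun i' j' hne => by rw [e4 i' j' hne, hoth i' j' hne]⟩
      · simp only [hz, reduceIte]
        by_cases he : qget q i = qget q next
        · simp only [he, if_pos rfl, reduceIte]
          set m2 := pvSet (pvSet m i j (qget q next * 2)) next j 0 with hm2
          set q2 := qset (qset q i (qget q next * 2)) next 0 with hq2
          have hm2p : Pre_try_move_up m2 := pre_pvSet _ _ _ _ (pre_pvSet _ _ _ _ hm)
          have hq2g : ∀ i' < 4, pvGet m2 i' j = qget q2 i' := by
            intro i' hi'
            have hnl2 : next < (pvSet m i j (qget q next * 2)).length := by rw [pvSet_length]; exact hnlen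
            have hjl2 : j < ((pvSet m i j (qget q next * 2)).getD next []).length := by
              rw [pvSet_row_length]
              exact lt_of_lt_of_le hj4 (hm.2 next (by simp [List.mem_range]; omega))
            rw [hm2, pvGet_pvSet _ _ _ _ _ _ hnl2 hjl2, pvGet_pvSet _ _ _ _ _ _ hilen hjlen,
              hq2, qget_qset _ _ _ _ hn4 hi', qget_qset _ _ _ _ hi4 hi']
            by_cases e1 : i' = next <;> by_cases e2 : i' = i <;> simp [e1, e2, hq i' hi']
          have hoth : ∀ i' j', j' ≠ j → pvGet m2 i' j' = pvGet m i' j' := by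
            intro i' j' hne
            have hnl2 : next < (pvSet m i j (qget q next * 2)).length := by rw [pvSet_length]; exact hnlen
            have hjl2 : j < ((pvSet m i j (qget q next * 2)).getD next []).length := by
              rw [pvSet_row_length]
              exact lt_of_lt_of_le hj4 (hm.2 next (by simp [List.mem_range]; omega))
            rw [hm2, pvGet_pvSet _ _ _ _ _ _ hnl2 hjl2, pvGet_pvSet _ _ _ _ _ _ hilen hjlen]
            simp [hne]
          exact ⟨m2, rfl, hm2p, hq2g, hoth⟩
        · simp only [he, reduceIte]
          exact ⟨m, rfl, hm, hq, fun _ _ _ => rfl⟩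

-- A's `for i` loop simulates the machine's
theorem iLoopSim (is : List Nat) :
    ∀ (m : List (List Int)) (q : Int×Int×Int×Int) (v : Bool) (s : Int) (j : Nat),
    (∀ i ∈ is, i < 4) → j < 4 → Pre_try_move_up m →
    (∀ i' < 4, pvGet m i' j = qget q i') →
    ∃ m', iLoopA j is (m, v, s) = (m', (iLoopQ is (q, v, s)).2)
      ∧ Pre_try_move_up m'
      ∧ (∀ i' < 4, pvGet m' i' j = qget (iLoopQ is (q, v, s)).1 i')
      ∧ (∀ i' j', j' ≠ j → pvGet m' i' j' = pvGet m i' j') := by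
  induction is with
  | nil =>
    intro m q v s j _ _ hm hq
    exact ⟨m, rfl, hm, hq, fun _ _ _ => rfl⟩
  | cons i rest ih =>
    intro m q v s j his hj4 hm hq
    have hi4 : i < 4 := his i (by simp)
    have hrest : ∀ n ∈ rest, n < 4 := fun n hn' => his n (by simp [hn'])
    have hn : ∀ n ∈ List.range' (i+1) (3-i), n < 4 := by
      intro n hn'
      have := List.mem_range'.1 hn'
      omega
    obtain ⟨m1, e1, e2, e3, e4⟩ := innerSim (List.range' (i+1) (3-i)) m q v s i j hn hi4 hj4 hm hq
    rw [iLoopA, iLoopQ]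
    simp only [e1]
    by_cases hb : (innerQ i (List.range' (i+1) (3-i)) (q, v, s)).2
    · simp only [hb, reduceIte]
      obtain ⟨m', f1, f2, f3, f4⟩ := ih m1 (innerQ i (List.range' (i+1) (3-i)) (q, v, s)).1.1
        (innerQ i (List.range' (i+1) (3-i)) (q, v, s)).1.2.1
        (innerQ i (List.range' (i+1) (3-i)) (q, v, s)).1.2.2 j hrest hj4 e2 e3
      exact ⟨m', f1, f2, f3, fun i' j' hne => by rw [f4 i' j' hne, e4 i' j' hne]⟩
    · simp only [hb, reduceIte]
      exact ⟨m1, rfl, e2, e3, e4⟩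

-- one full column pass of A = B's column rebuild, on the real grid
theorem colStep (m : List (List Int)) (j : Nat) (hj : j < 4) (hm : Pre_try_move_up m) (v : Bool) (s : Int) :
    ∃ m', iLoopA j [0,1,2] (m, v, s) =
        (m', v || decide (newCol (colL m j) ≠ colL m j), s + (mergeB ((colL m j).filter (· ≠ 0))).2)
      ∧ Pre_try_move_up m'
      ∧ (∀ i' < 4, pvGet m' i' j = (newCol (colL m j)).getD i' 0)
      ∧ (∀ i' j', j' ≠ j → pvGet m' i' j' = pvGet m i' j') := by
  obtain ⟨m', e1, e2, e3, e4⟩ := iLoopSim [0,1,2] m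
    (pvGet m 0 j, pvGet m 1 j, pvGet m 2 j, pvGet m 3 j) v s j
    (by intro i hi; fin_cases hi <;> norm_num) hj hm
    (by intro i' hi'; interval_cases i' <;> rfl)
  rw [qMain] at e1 e3
  refine ⟨m', ?_, e2, ?_, e4⟩
  · rw [e1]; rfl
  · intro i' hi'
    rw [e3 i' hi']
    interval_cases i' <;> rfl

theorem mergeB_length (l : List Int) : (mergeB l).1.length ≤ l.length := by
  induction l using mergeB.induct <;> simp_all [mergeB] <;> omega

theorem newCol_length (c : List Int) (h : c.length = 4) : (newCol c).length = 4 := by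
  have h1 := mergeB_length (c.filter (· ≠ 0))
  have h2 := List.length_filter_le (fun x => x ≠ 0) c
  simp only [newCol, List.length_append, List.length_replicate]
  omega

theorem pairB_len4 (l : List Int) (h : l.length = 4) :
    pairB [l.getD 0 0, l.getD 1 0, l.getD 2 0, l.getD 3 0] = pairB l := by
  rcases l with _|⟨a,_|⟨b,_|⟨c,_|⟨d,_|e⟩⟩⟩⟩ <;> simp_all

theorem rowPair (m : List (List Int)) (i : Nat) (s : Int) :
    rowWhile m i 4 0 s = s + pairB [pvGet m i 0, pvGet m i 1, pvGet m i 2, pvGet m i 3] := by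
  simp only [rowWhile, pairB]
  norm_num
  split_ifs <;> simp_all [rowWhile, pairB] <;> omega

theorem colPair (m : List (List Int)) (j : Nat) (s : Int) :
    colWhile m j 4 0 s = s + pairB [pvGet m 0 j, pvGet m 1 j, pvGet m 2 j, pvGet m 3 j] := by
  simp only [colWhile, pairB]
  norm_num
  split_ifs <;> simp_all [colWhile, pairB] <;> omega

-- ===== VERDICT =====
theorem try_move_up_spec : Claim_equal_try_move_up := by
  intro map _ hpre
  unfold Spec_try_move_up
  have hr4 : List.range 4 = [0,1,2,3] := rfl
  obtain ⟨m1, e1, p1, g1, o1⟩ := colStep map 0 (by norm_num) hpre false 0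
  have c1 : colL m1 1 = colL map 1 := by
    unfold colL
    rw [o1 0 1 (by norm_num), o1 1 1 (by norm_num), o1 2 1 (by norm_num), o1 3 1 (by norm_num)]
  obtain ⟨m2, e2, p2, g2, o2⟩ := colStep m1 1 (by norm_num) p1
    (false || decide (newCol (colL map 0) ≠ colL map 0)) (0 + (mergeB ((colL map 0).filter (· ≠ 0))).2)
  rw [c1] at e2 g2
  have c2 : colL m2 2 = colL map 2 := by
    unfold colL
    rw [o2 0 2 (by norm_num), o2 1 2 (by norm_num), o2 2 2 (by norm_num), o2 3 2 (by norm_num),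
      o1 0 2 (by norm_num), o1 1 2 (by norm_num), o1 2 2 (by norm_num), o1 3 2 (by norm_num)]
  obtain ⟨m3, e3, p3, g3, o3⟩ := colStep m2 2 (by norm_num) p2
    (false || decide (newCol (colL map 0) ≠ colL map 0) || decide (newCol (colL map 1) ≠ colL map 1))
    (0 + (mergeB ((colL map 0).filter (· ≠ 0))).2 + (mergeB ((colL map 1).filter (· ≠ 0))).2)
  rw [c2] at e3 g3
  have c3 : colL m3 3 = colL map 3 := by
    unfold colL
    rw [o3 0 3 (by norm_num), o3 1 3 (by norm_num), o3 2 3 (by norm_num), o3 3 3 (by norm_num),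
      o2 0 3 (by norm_num), o2 1 3 (by norm_num), o2 2 3 (by norm_num), o2 3 3 (by norm_num),
      o1 0 3 (by norm_num), o1 1 3 (by norm_num), o1 2 3 (by norm_num), o1 3 3 (by norm_num)]
  obtain ⟨m4, e4, p4, g4, o4⟩ := colStep m3 3 (by norm_num) p3
    (false || decide (newCol (colL map 0) ≠ colL map 0) || decide (newCol (colL map 1) ≠ colL map 1)
      || decide (newCol (colL map 2) ≠ colL map 2))
    (0 + (mergeB ((colL map 0).filter (· ≠ 0))).2 + (mergeB ((colL map 1).filter (· ≠ 0))).2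
      + (mergeB ((colL map 2).filter (· ≠ 0))).2)
  rw [c3] at e4 g4
  have q0 : ∀ i' < 4, pvGet m4 i' 0 = (newCol (colL map 0)).getD i' 0 := fun i' h => by
    rw [o4 i' 0 (by norm_num), o3 i' 0 (by norm_num), o2 i' 0 (by norm_num), g1 i' h]
  have q1 : ∀ i' < 4, pvGet m4 i' 1 = (newCol (colL map 1)).getD i' 0 := fun i' h => by
    rw [o4 i' 1 (by norm_num), o3 i' 1 (by norm_num), g2 i' h]
  have q2 : ∀ i' < 4, pvGet m4 i' 2 = (newCol (colL map 2)).getD i' 0 := fun i' h => by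
    rw [o4 i' 2 (by norm_num), g3 i' h]
  have q3 : ∀ i' < 4, pvGet m4 i' 3 = (newCol (colL map 3)).getD i' 0 := g4
  have hA : try_move_up map =
      (false || decide (newCol (colL map 0) ≠ colL map 0) || decide (newCol (colL map 1) ≠ colL map 1)
        || decide (newCol (colL map 2) ≠ colL map 2) || decide (newCol (colL map 3) ≠ colL map 3),
       0 + (mergeB ((colL map 0).filter (· ≠ 0))).2 + (mergeB ((colL map 1).filter (· ≠ 0))).2
        + (mergeB ((colL map 2).filter (· ≠ 0))).2 + (mergeB ((colL map 3).filter (· ≠ 0))).2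
        + adjacent_check m4) := by
    simp only [try_move_up, hr4, List.foldl]
    rw [e1, e2, e3, e4]
  have hlen : ∀ j : Nat, (newCol (colL map j)).length = 4 := fun j => newCol_length _ rfl
  have hadj : adjacent_check m4 =
      0 + pairB [(newCol (colL map 0)).getD 0 0, (newCol (colL map 1)).getD 0 0, (newCol (colL map 2)).getD 0 0, (newCol (colL map 3)).getD 0 0]
        + pairB [(newCol (colL map 0)).getD 1 0, (newCol (colL map 1)).getD 1 0, (newCol (colL map 2)).getD 1 0, (newCol (colL map 3)).getD 1 0]
        + pairB [(newCol (colL map 0)).getD 2 0, (newCol (colL map 1)).getD 2 0, (newCol (colL map 2)).getD 2 0, (newCol (colL map 3)).getD 2 0]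
        + pairB [(newCol (colL map 0)).getD 3 0, (newCol (colL map 1)).getD 3 0, (newCol (colL map 2)).getD 3 0, (newCol (colL map 3)).getD 3 0]
        + pairB (newCol (colL map 0)) + pairB (newCol (colL map 1))
        + pairB (newCol (colL map 2)) + pairB (newCol (colL map 3)) := by
    simp only [adjacent_check, hr4, List.foldl]
    rw [rowPair, rowPair, rowPair, rowPair, colPair, colPair, colPair, colPair]
    rw [q0 0 (by norm_num), q0 1 (by norm_num), q0 2 (by norm_num), q0 3 (by norm_num),
      q1 0 (by norm_num), q1 1 (by norm_num), q1 2 (by norm_num), q1 3 (by norm_num),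
      q2 0 (by norm_num), q2 1 (by norm_num), q2 2 (by norm_num), q2 3 (by norm_num),
      q3 0 (by norm_num), q3 1 (by norm_num), q3 2 (by norm_num), q3 3 (by norm_num)]
    rw [pairB_len4 _ (hlen 0), pairB_len4 _ (hlen 1), pairB_len4 _ (hlen 2), pairB_len4 _ (hlen 3)]
  rw [hA, hadj]
  simp only [try_move_up_alt, hr4, List.foldl, List.map, List.sum_cons, List.sum_nil,
    List.nil_append, List.cons_append, List.append_nil,
    List.getD_cons_zero, List.getD_cons_succ, newCol, colL]
  simp only [Prod.mk.injEq]
  constructor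
  · rfl
  · ring
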